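-- pv_equiv track=rewrite | github.com/Panjx2/Deep | pythonProject/whole_package/evaluator.py | scenario_group_hints
-- ===== SOURCE A (Python) =====
-- def scenario_group_hints(names: list[str]) -> list[str]:
--     hints = []
--     if any("slash_monthfirst" in name for name in names):
--         hints.append("slash dates likely read as month/day instead of day/month")
--     if any("dash_dayfirst" in name for name in names):
--         hints.append("dash dates likely read as day-month-year instead of month-day-year")
--     if any(name.endswith("__add") for name in names):
--         hints.append("replacement_total likely added instead of replacing computed month totals")
--     if any("generic_dayfirst" in name for name in names):
--         hints.append("generic parser likely used instead of explicit formats")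
--     if any("refund_fifo" in name for name in names):
--         hints.append("refunds may be matching FIFO instead of LIFO")
--     if any("refund_lifo_any_month" in name for name in names):
--         hints.append("refunds may be cancelling purchases across month boundaries")
--     if any("refund_direct_subtract" in name for name in names):
--         hints.append("refunds may be subtracted directly instead of cancelling a prior purchase")
--     if any("ignore_signup_gate" in name for name in names):
--         hints.append("purchases before signup may have been counted")
--     if any("missing_amount_nan" in name for name in names):
--         hints.append("missing purchase amounts may not have been coerced to zero")
--     return hints
-- ===== SOURCE B (Python) =====
-- SEP = "\x00"  # cannot occur in scenario names (printable ASCII)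
--
-- def scenario_group_hints(names: list[str]) -> list[str]:
--     # Fuse all names into one sentinel-separated blob; each condition becomes a
--     # single substring search on the blob (endswith("__add") == "__add"+SEP in blob).
--     blob = "".join(name + SEP for name in names)
--     hints = []
--     if "slash_monthfirst" in blob:
--         hints.append("slash dates likely read as month/day instead of day/month")
--     if "dash_dayfirst" in blob:
--         hints.append("dash dates likely read as day-month-year instead of month-day-year")
--     if "__add" + SEP in blob:
--         hints.append("replacement_total likely added instead of replacing computed month totals")
--     if "generic_dayfirst" in blob:
--         hints.append("generic parser likely used instead of explicit formats")
--     if "refund_fifo" in blob: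
--         hints.append("refunds may be matching FIFO instead of LIFO")
--     if "refund_lifo_any_month" in blob:
--         hints.append("refunds may be cancelling purchases across month boundaries")
--     if "refund_direct_subtract" in blob:
--         hints.append("refunds may be subtracted directly instead of cancelling a prior purchase")
--     if "ignore_signup_gate" in blob:
--         hints.append("purchases before signup may have been counted")
--     if "missing_amount_nan" in blob:
--         hints.append("missing purchase amounts may not have been coerced to zero")
--     return hints
-- ===== Notes on version B (the rewrite author's own statement) =====
-- stated objective: alternative
-- what changed: A runs nine any(...) generator scans, each testing every name separately; B first fuses all names into one NUL-separated blob string and then decides each of the nine conditions by a single substring search on that blob (the endswith test becomes searching for '__add'+NUL), so no per-name loop remains; correct because the NUL sentinel cannot occur inside printable-ASCII names, so a pattern match never spans a name boundary.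
import Mathlib
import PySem

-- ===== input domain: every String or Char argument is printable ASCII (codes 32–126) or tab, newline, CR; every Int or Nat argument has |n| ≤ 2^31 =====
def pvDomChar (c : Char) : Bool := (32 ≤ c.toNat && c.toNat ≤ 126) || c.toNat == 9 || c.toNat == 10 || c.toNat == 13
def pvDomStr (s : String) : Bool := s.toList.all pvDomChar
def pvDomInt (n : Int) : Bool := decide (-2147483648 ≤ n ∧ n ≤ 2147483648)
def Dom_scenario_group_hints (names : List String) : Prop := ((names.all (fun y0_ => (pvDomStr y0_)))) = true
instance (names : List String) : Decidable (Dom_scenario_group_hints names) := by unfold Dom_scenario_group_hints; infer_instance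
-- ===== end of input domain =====

-- B fuses all names into one NUL-separated blob and decides each of A's nine conditions by a
-- single substring search on the blob (endswith "__add" becomes searching "__add"+NUL);
-- objective: alternative (no per-name scanning loop).

-- ===== PORT A =====
-- literal transliteration: hints starts empty, nine if-any-append steps
def scenario_group_hints (names : List String) : List String :=
  let hints : List String := []
  let hints := if names.any (fun name => PySem.Str.isIn "slash_monthfirst" name) then hints ++ ["slash dates likely read as month/day instead of day/month"] else hints
  let hints := if names.any (fun name => PySem.Str.isIn "dash_dayfirst" name) then hints ++ ["dash dates likely read as day-month-year instead of month-day-year"] else hints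
  let hints := if names.any (fun name => PySem.Str.endswith name "__add") then hints ++ ["replacement_total likely added instead of replacing computed month totals"] else hints
  let hints := if names.any (fun name => PySem.Str.isIn "generic_dayfirst" name) then hints ++ ["generic parser likely used instead of explicit formats"] else hints
  let hints := if names.any (fun name => PySem.Str.isIn "refund_fifo" name) then hints ++ ["refunds may be matching FIFO instead of LIFO"] else hints
  let hints := if names.any (fun name => PySem.Str.isIn "refund_lifo_any_month" name) then hints ++ ["refunds may be cancelling purchases across month boundaries"] else hints
  let hints := if names.any (fun name => PySem.Str.isIn "refund_direct_subtract" name) then hints ++ ["refunds may be subtracted directly instead of cancelling a prior purchase"] else hints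
  let hints := if names.any (fun name => PySem.Str.isIn "ignore_signup_gate" name) then hints ++ ["purchases before signup may have been counted"] else hints
  let hints := if names.any (fun name => PySem.Str.isIn "missing_amount_nan" name) then hints ++ ["missing purchase amounts may not have been coerced to zero"] else hints
  hints

-- ===== PORT B =====
-- SEP = "\x00"
def pvSep : Char := Char.ofNat 0

-- blob = "".join(name + SEP for name in names); exact: ''-join of char lists is flatten
def pvBlob (names : List String) : List Char :=
  (names.map (fun name => name.toList ++ [pvSep])).flatten

def scenario_group_hints_alt (names : List String) : List String :=
  let blob := pvBlob names
  let hints : List String := []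
  let hints := if PySem.Chars.isIn "slash_monthfirst".toList blob then hints ++ ["slash dates likely read as month/day instead of day/month"] else hints
  let hints := if PySem.Chars.isIn "dash_dayfirst".toList blob then hints ++ ["dash dates likely read as day-month-year instead of month-day-year"] else hints
  let hints := if PySem.Chars.isIn ("__add".toList ++ [pvSep]) blob then hints ++ ["replacement_total likely added instead of replacing computed month totals"] else hints
  let hints := if PySem.Chars.isIn "generic_dayfirst".toList blob then hints ++ ["generic parser likely used instead of explicit formats"] else hints
  let hints := if PySem.Chars.isIn "refund_fifo".toList blob then hints ++ ["refunds may be matching FIFO instead of LIFO"] else hints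
  let hints := if PySem.Chars.isIn "refund_lifo_any_month".toList blob then hints ++ ["refunds may be cancelling purchases across month boundaries"] else hints
  let hints := if PySem.Chars.isIn "refund_direct_subtract".toList blob then hints ++ ["refunds may be subtracted directly instead of cancelling a prior purchase"] else hints
  let hints := if PySem.Chars.isIn "ignore_signup_gate".toList blob then hints ++ ["purchases before signup may have been counted"] else hints
  let hints := if PySem.Chars.isIn "missing_amount_nan".toList blob then hints ++ ["missing purchase amounts may not have been coerced to zero"] else hints
  hints

-- ===== PRECONDITION & SPEC =====
def Spec_scenario_group_hints (names : List String) (out : List String) : Prop := out = scenario_group_hints_alt names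
instance (names : List String) (out : List String) : Decidable (Spec_scenario_group_hints names out) := by unfold Spec_scenario_group_hints; infer_instance

-- ===== CLAIM (what is proved, stated in full; the proofs are below) =====
def Claim_equal_scenario_group_hints : Prop := ∀ (names : List String), Dom_scenario_group_hints names → Spec_scenario_group_hints names (scenario_group_hints names)

-- ===== LEMMAS AND PROOFS =====

-- a pattern not containing c is a prefix of a ++ c :: b iff it is a prefix of a
theorem pv_prefix_split (p a b : List Char) (c : Char) (hc : c ∉ p) :
    p <+: a ++ c :: b ↔ p <+: a := by
  induction p generalizing a with
  | nil => simp
  | cons q p' ih =>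
    cases a with
    | nil =>
      simp only [List.nil_append, List.cons_prefix_cons, List.prefix_nil]
      constructor
      · rintro ⟨rfl, -⟩; exact absurd (List.mem_cons_self) hc
      · intro h; exact absurd h (by simp)
    | cons x a' =>
      simp only [List.cons_append, List.cons_prefix_cons]
      exact and_congr_right fun _ => ih a' (fun h => hc (List.mem_cons_of_mem _ h))

-- a pattern not containing c is infix of a ++ c :: b iff it is infix of a or of b
theorem pv_infix_split (p a b : List Char) (c : Char) (hc : c ∉ p) :
    p <:+: a ++ c :: b ↔ p <:+: a ∨ p <:+: b := by
  induction a with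
  | nil =>
    have h0 := pv_prefix_split p [] b c hc
    simp only [List.nil_append] at h0 ⊢
    rw [List.infix_cons_iff, h0, List.prefix_nil, List.infix_nil]
  | cons x a' ih =>
    have h1 := pv_prefix_split p (x :: a') b c hc
    simp only [List.cons_append] at h1 ⊢
    rw [List.infix_cons_iff, h1, ih, List.infix_cons_iff]
    tauto

-- p ++ [c] is a prefix of n ++ c :: b iff p = n, when c occurs in neither p nor n
theorem pv_prefix_close (p n b : List Char) (c : Char) (hp : c ∉ p) (hn : c ∉ n) :
    p ++ [c] <+: n ++ c :: b ↔ p = n := by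
  induction p generalizing n with
  | nil =>
    cases n with
    | nil => simp
    | cons y n' =>
      simp only [List.nil_append, List.cons_append, List.cons_prefix_cons]
      constructor
      · rintro ⟨rfl, -⟩; exact absurd (List.mem_cons_self) hn
      · intro h; exact absurd h (by simp)
  | cons q p' ih =>
    cases n with
    | nil =>
      simp only [List.cons_append, List.nil_append, List.cons_prefix_cons]
      constructor
      · rintro ⟨rfl, -⟩; exact absurd (List.mem_cons_self) hp
      · intro h; exact absurd h (by simp)
    | cons y n' =>
      simp only [List.cons_append, List.cons_prefix_cons, List.cons.injEq]
      exact and_congr_right fun _ =>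
        ih n' (fun h => hp (List.mem_cons_of_mem _ h)) (fun h => hn (List.mem_cons_of_mem _ h))

-- p ++ [c] is infix of n ++ c :: b iff p is a suffix of n or p ++ [c] is infix of b
theorem pv_infix_close (p n b : List Char) (c : Char) (hp : c ∉ p) (hn : c ∉ n) :
    p ++ [c] <:+: n ++ c :: b ↔ p <:+ n ∨ p ++ [c] <:+: b := by
  induction n with
  | nil =>
    have h0 := pv_prefix_close p [] b c hp (by simp)
    simp only [List.nil_append] at h0 ⊢
    rw [List.infix_cons_iff, h0, List.suffix_nil]
  | cons y n' ih =>
    have h1 := pv_prefix_close p (y :: n') b c hp hn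
    simp only [List.cons_append] at h1 ⊢
    rw [List.infix_cons_iff, h1, ih (fun h => hn (List.mem_cons_of_mem _ h)),
      List.suffix_cons_iff]
    tauto

-- Dom strings do not contain the NUL sentinel
theorem pv_sep_not_mem {n : String} (h : pvDomStr n = true) : pvSep ∉ n.toList := by
  intro hmem
  have := (List.all_eq_true.mp h) _ hmem
  simp [pvDomChar, pvSep] at this

-- blob search = per-name substring scan, for nonempty sentinel-free patterns
theorem pv_isIn_blob (names : List String) (p : String)
    (hd : Dom_scenario_group_hints names) (hp : pvSep ∉ p.toList) (hne : p.toList ≠ []) :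
    PySem.Chars.isIn p.toList (pvBlob names) = names.any (fun name => PySem.Str.isIn p name) := by
  induction names with
  | nil =>
    simp only [pvBlob, List.map_nil, List.flatten_nil, List.any_nil]
    rw [PySem.Chars.isIn_eq_false_iff]
    simp [List.infix_nil, hne]
  | cons n t ih =>
    have hd' : Dom_scenario_group_hints t := by
      simp only [Dom_scenario_group_hints, List.all_cons, Bool.and_eq_true] at hd ⊢
      exact hd.2
    have hb : pvBlob (n :: t) = n.toList ++ pvSep :: pvBlob t := by simp [pvBlob]
    rw [Bool.eq_iff_iff, PySem.Chars.isIn_iff_infix, hb, pv_infix_split _ _ _ _ hp]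
    simp only [List.any_cons, Bool.or_eq_true]
    apply or_congr
    · rw [PySem.Str.isIn_iff_infix]
    · rw [← ih hd', PySem.Chars.isIn_iff_infix]

-- blob search for p ++ [NUL] = per-name endswith scan, for sentinel-free p
theorem pv_ends_blob (names : List String) (p : String)
    (hd : Dom_scenario_group_hints names) (hp : pvSep ∉ p.toList) :
    PySem.Chars.isIn (p.toList ++ [pvSep]) (pvBlob names)
      = names.any (fun name => PySem.Str.endswith name p) := by
  induction names with
  | nil =>
    simp only [pvBlob, List.map_nil, List.flatten_nil, List.any_nil]
    rw [PySem.Chars.isIn_eq_false_iff]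
    simp [List.infix_nil]
  | cons n t ih =>
    have hdn : pvDomStr n = true := by
      simp only [Dom_scenario_group_hints, List.all_cons, Bool.and_eq_true] at hd
      exact hd.1
    have hd' : Dom_scenario_group_hints t := by
      simp only [Dom_scenario_group_hints, List.all_cons, Bool.and_eq_true] at hd
      exact hd.2
    have hb : pvBlob (n :: t) = n.toList ++ pvSep :: pvBlob t := by simp [pvBlob]
    rw [Bool.eq_iff_iff, PySem.Chars.isIn_iff_infix, hb,
      pv_infix_close _ _ _ _ hp (pv_sep_not_mem hdn)]
    simp only [List.any_cons, Bool.or_eq_true]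
    apply or_congr
    · rw [PySem.Str.endswith_eq, PySem.Chars.endswith_iff]
    · rw [← ih hd', PySem.Chars.isIn_iff_infix]

-- ===== VERDICT (by name: the statement is the Claim_ definition above) =====
theorem scenario_group_hints_spec : Claim_equal_scenario_group_hints := by
  intro names hd
  show scenario_group_hints names = scenario_group_hints_alt names
  simp only [scenario_group_hints, scenario_group_hints_alt,
    pv_isIn_blob names "slash_monthfirst" hd (by decide) (by decide),
    pv_isIn_blob names "dash_dayfirst" hd (by decide) (by decide),
    pv_ends_blob names "__add" hd (by decide),
    pv_isIn_blob names "generic_dayfirst" hd (by decide) (by decide),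
    pv_isIn_blob names "refund_fifo" hd (by decide) (by decide),
    pv_isIn_blob names "refund_lifo_any_month" hd (by decide) (by decide),
    pv_isIn_blob names "refund_direct_subtract" hd (by decide) (by decide),
    pv_isIn_blob names "ignore_signup_gate" hd (by decide) (by decide),
    pv_isIn_blob names "missing_amount_nan" hd (by decide) (by decide)]
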